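-- pv_equiv track=rewrite | github.com/HashFast/hashfast-tools | hf/util.py | reverse_every_four_bytes
-- ===== SOURCE A (Python) =====
-- def reverse_every_four_bytes(bytelist):
--     assert len(bytelist) % 4 == 0
--     assert {x >= 0 and x < 256 for x in bytelist} == set([True])
--     result = []
--     for i in range(int(len(bytelist)/4)):
--         a = bytelist[4*i:4*i+4]
--         a.reverse()
--         result = result + a
--     return result
-- ===== SOURCE B (Python) =====
-- def reverse_every_four_bytes(bytelist):
--     assert len(bytelist) % 4 == 0
--     assert all(0 <= x < 256 for x in bytelist)
--     def go(rest):
--         if not rest: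
--             return []
--         return [rest[3], rest[2], rest[1], rest[0]] + go(rest[4:])
--     return go(bytelist)
-- ===== Notes on version B (the rewrite author's own statement) =====
-- stated objective: alternative
-- what changed: B replaces A's indexed loop with per-group slice/.reverse()/repeated list concatenation by a structural recursion that peels four elements at a time and emits them in reversed order; Pre_ excludes exactly the inputs where A raises AssertionError (length not a multiple of 4, an element outside 0..255, and the empty list, whose range-check set comprehension is empty and fails A's == {True} assert).
import Mathlib
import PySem

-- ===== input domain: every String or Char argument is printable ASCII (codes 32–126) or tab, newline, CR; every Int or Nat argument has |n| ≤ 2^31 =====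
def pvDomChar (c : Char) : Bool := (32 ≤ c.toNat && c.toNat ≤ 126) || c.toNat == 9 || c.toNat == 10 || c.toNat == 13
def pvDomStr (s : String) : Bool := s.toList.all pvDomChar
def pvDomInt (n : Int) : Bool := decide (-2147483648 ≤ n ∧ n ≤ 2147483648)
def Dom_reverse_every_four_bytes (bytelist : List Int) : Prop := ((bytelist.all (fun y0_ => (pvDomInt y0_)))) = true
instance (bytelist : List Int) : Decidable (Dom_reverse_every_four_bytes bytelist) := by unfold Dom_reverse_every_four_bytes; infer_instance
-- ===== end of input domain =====

-- B replaces A's indexed slice/reverse/concat loop by a structural recursion that peels four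
-- elements at a time and emits them reversed; equivalence is proved on Pre_ below.

-- ===== PORT A =====
-- for i in range(int(len(bytelist)/4)): result = result + reversed(bytelist[4*i:4*i+4])
def reverse_every_four_bytes (bytelist : List Int) : List Int :=
  (PySem.List.pyRange 0 (PySem.Int.floordiv (bytelist.length : Int) 4) 1).foldl
    (fun result i =>
      result ++ (PySem.List.slice bytelist (some (4 * i)) (some (4 * i + 4))).reverse)
    []

-- ===== PORT B =====
-- def go(rest): [] if empty else [rest[3], rest[2], rest[1], rest[0]] + go(rest[4:])
-- (the catch-all branch is unreachable under Pre_: Python's go raises IndexError on a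
--  non-empty list shorter than 4, which Pre_ excludes)
def reverse_every_four_bytes_alt (bytelist : List Int) : List Int :=
  match bytelist with
  | [] => []
  | a :: b :: c :: d :: rest => d :: c :: b :: a :: reverse_every_four_bytes_alt rest
  | l => l

-- ===== PRECONDITION & SPEC =====
-- Pre_ excludes exactly the inputs where A raises AssertionError: length not a multiple of 4,
-- an element outside 0..255, and the empty list (whose range-check set is empty, ≠ {True}).
def Pre_reverse_every_four_bytes (bytelist : List Int) : Prop :=
  bytelist.length % 4 = 0 ∧ bytelist ≠ [] ∧ ∀ x ∈ bytelist, 0 ≤ x ∧ x < 256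
instance (bytelist : List Int) : Decidable (Pre_reverse_every_four_bytes bytelist) := by
  unfold Pre_reverse_every_four_bytes; infer_instance
def pvWitness_reverse_every_four_bytes : List Int := [1, 2, 3, 4]

def Spec_reverse_every_four_bytes (bytelist : List Int) (out : List Int) : Prop :=
  out = reverse_every_four_bytes_alt bytelist
instance (bytelist : List Int) (out : List Int) : Decidable (Spec_reverse_every_four_bytes bytelist out) := by
  unfold Spec_reverse_every_four_bytes; infer_instance

-- ===== CLAIM (what is proved, stated in full; the proofs are below) =====
def Claim_equal_reverse_every_four_bytes : Prop :=
  ∀ (bytelist : List Int), Dom_reverse_every_four_bytes bytelist →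
    Pre_reverse_every_four_bytes bytelist →
    Spec_reverse_every_four_bytes bytelist (reverse_every_four_bytes bytelist)

-- ===== LEMMAS AND PROOFS =====

theorem pvA_flatMap (m : ℕ) (l : List Int) (h : l.length = 4 * m) :
    (List.range m).flatMap (fun k => ((l.drop (4 * k)).take 4).reverse)
      = reverse_every_four_bytes_alt l := by
  induction m generalizing l with
  | zero =>
    have : l = [] := List.eq_nil_of_length_eq_zero (by omega)
    simp [this, reverse_every_four_bytes_alt]
  | succ m ih =>
    match l, h with
    | a :: b :: c :: d :: rest, h =>
      have hr : rest.length = 4 * m := by simp at h; omega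
      rw [List.range_succ_eq_map]
      simp only [List.flatMap_cons, List.flatMap_map]
      have : ∀ k, ((((a :: b :: c :: d :: rest).drop (4 * (k + 1))).take 4).reverse)
          = ((rest.drop (4 * k)).take 4).reverse := by
        intro k
        have : 4 * (k + 1) = (4 * k) + 4 := by ring
        rw [this]
        rfl
      simp only [Nat.succ_eq_add_one, this]
      rw [ih rest hr]
      simp [reverse_every_four_bytes_alt]

theorem reverse_every_four_bytes_spec : Claim_equal_reverse_every_four_bytes := by
  intro bl _ hpre
  obtain ⟨hlen, -, -⟩ := hpre
  obtain ⟨m, hm⟩ : ∃ m, bl.length = 4 * m := ⟨bl.length / 4, by omega⟩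
  unfold Spec_reverse_every_four_bytes reverse_every_four_bytes
  rw [PySem.List.foldl_append_eq_flatMap, List.nil_append]
  have hA : PySem.Int.floordiv ((bl.length : Int)) 4 = (m : Int) := by
    rw [show (4 : Int) = ((4 : ℕ) : Int) by norm_num, PySem.Int.floordiv_natCast, hm,
      Nat.mul_div_cancel_left _ (by norm_num : 0 < 4)]
  rw [hA, PySem.List.pyRange_zero_natCast, List.flatMap_map]
  have hslice : ∀ k : ℕ,
      (PySem.List.slice bl (some (4 * (k : Int))) (some (4 * (k : Int) + 4))).reverse
        = ((bl.drop (4 * k)).take 4).reverse := by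
    intro k
    rw [show (4 * (k : Int)) = (((4 * k : ℕ)) : Int) by push_cast; ring,
      show ((((4 * k : ℕ)) : Int) + 4) = (((4 * k : ℕ)) : Int) + ((4 : ℕ) : Int) by norm_num,
      PySem.List.slice_natCast_add]
  simp only [hslice]
  exact pvA_flatMap m bl hm
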